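-- pv_equiv track=rewrite | github.com/gulbiarchive/programmers | lv1/82612.py | solution
-- ===== SOURCE A (Python) =====
-- def solution(price, money, count):
--
--     result = 0
--     for i in range(1, count+1):
--         result += price * i
--
--     # if result - money > 0:
--     #     return result - money
--     # else:
--     #     return 0
--
--     '''
--     파이썬의 삼항 조건 연산자
--     if - else 조건문 한 줄 표현
--
--     true_answer if condition else false_answer
--
--     condition이 참일 땐 true_anwer 반환
--     condition이 거짓일 땐 flase_answer 반환
--     '''
--
--     # 금액 부족하지 않으면 0 반환 기억
--     # reuslt가 작다는 건 money가 더 커서 부족하지 않으므로 0 반환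
--     return result - money if result > money else 0
-- ===== SOURCE B (Python) =====
-- def solution(price, money, count):
--     total = price * count * (count + 1) // 2 if count > 0 else 0
--     return max(total - money, 0)
-- ===== Notes on version B (the rewrite author's own statement) =====
-- stated objective: faster
-- what changed: replaces the O(count) summation loop with the arithmetic-series closed form price*count*(count+1)//2 and expresses the clamp with max
import Mathlib
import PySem

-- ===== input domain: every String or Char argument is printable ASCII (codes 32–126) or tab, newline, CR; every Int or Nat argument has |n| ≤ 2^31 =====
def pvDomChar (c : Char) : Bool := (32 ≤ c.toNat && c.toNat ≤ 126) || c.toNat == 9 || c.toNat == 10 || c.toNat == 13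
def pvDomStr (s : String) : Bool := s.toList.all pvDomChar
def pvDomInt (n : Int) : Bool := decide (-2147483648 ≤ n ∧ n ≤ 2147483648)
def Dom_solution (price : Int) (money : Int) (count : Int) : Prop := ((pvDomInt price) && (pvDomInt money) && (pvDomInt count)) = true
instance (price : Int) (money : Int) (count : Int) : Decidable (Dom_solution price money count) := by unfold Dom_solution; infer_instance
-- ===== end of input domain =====

-- B replaces A's O(count) summation loop with the closed form price*count*(count+1)//2 (clamped with max); proved equal for all inputs.


-- ===== PORT A =====
def solution (price : Int) (money : Int) (count : Int) : Int :=
  let result := (PySem.List.pyRange 1 (count + 1) 1).foldl (fun r i => r + price * i) 0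
  if result > money then result - money else 0

-- ===== PORT B =====
def solution_alt (price : Int) (money : Int) (count : Int) : Int :=
  let total := if count > 0 then PySem.Int.floordiv (price * count * (count + 1)) 2 else 0
  max (total - money) 0

-- ===== PRECONDITION & SPEC =====
def Spec_solution (price : Int) (money : Int) (count : Int) (out : Int) : Prop := out = solution_alt price money count
instance (price : Int) (money : Int) (count : Int) (out : Int) : Decidable (Spec_solution price money count out) := by unfold Spec_solution; infer_instance

-- ===== CLAIM (what is proved, stated in full; the proofs are below) =====
def Claim_equal_solution : Prop := ∀ (price : Int) (money : Int) (count : Int), Dom_solution price money count → Spec_solution price money count (solution price money count)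

-- ===== LEMMAS AND PROOFS =====

-- the loop sum, doubled, is the closed form (stated over Nat count to enable induction)
theorem pv_loop_sum (price : Int) (n : Nat) :
    2 * (PySem.List.pyRange 1 ((n : Int) + 1) 1).foldl (fun r i => r + price * i) 0
      = price * n * ((n : Int) + 1) := by
  induction n with
  | zero =>
    rw [PySem.List.pyRange_one_eq_nil (by omega)]
    simp
  | succ k ih =>
    have h : PySem.List.pyRange 1 (((k : Int) + 1) + 1) 1
        = PySem.List.pyRange 1 ((k : Int) + 1) 1 ++ [(k : Int) + 1] :=
      PySem.List.pyRange_one_succ_right (by omega)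
    push_cast
    push_cast at ih
    rw [h, List.foldl_append]
    simp only [List.foldl]
    ring_nf
    ring_nf at ih
    omega

-- ===== VERDICT (by name: the statement is the Claim_ definition above) =====
theorem solution_spec : Claim_equal_solution := by
  intro price money count _
  unfold Spec_solution solution solution_alt
  by_cases hc : count > 0
  · have hcn : ((count.toNat : Int)) = count := by omega
    have h2 := pv_loop_sum price count.toNat
    rw [hcn] at h2
    set r := (PySem.List.pyRange 1 (count + 1) 1).foldl (fun r i => r + price * i) 0 with hr
    have hfd : PySem.Int.floordiv (price * count * (count + 1)) 2 = r := by
      rw [← h2, PySem.Int.floordiv_eq_ediv_of_pos (by omega)]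
      exact Int.mul_ediv_cancel_left r (by omega)
    simp only [if_pos hc, hfd]
    split_ifs with h <;> omega
  · rw [PySem.List.pyRange_one_eq_nil (by omega)]
    simp only [List.foldl_nil, if_neg hc]
    split_ifs with h <;> omega
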